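-- pv_equiv track=rewrite | github.com/Russ44-creator/Leetcode | Blogs/Sliding Window/lc2555-Maximize Win From Two Segments.py | maximizeWin
-- ===== SOURCE A (Python) =====
-- from typing import List
--
-- def maximizeWin(prizePositions: List[int], k: int) -> int:
--     n = len(prizePositions)
--     if k * 2 + 1 >= prizePositions[-1] - prizePositions[0]:
--         return n
--     pre = [0] * (n + 1)
--     ans = left = 0
--     for right, p in enumerate(prizePositions):
--         while p - prizePositions[left] > k:
--             left += 1
--         ans = max(ans, right - left + 1 + pre[left])
--         pre[right + 1] = max(pre[right], right - left + 1)
--     return ans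
-- ===== SOURCE B (Python) =====
-- from typing import List
-- from bisect import bisect_left, bisect_right
--
-- def maximizeWin(prizePositions: List[int], k: int) -> int:
--     n = len(prizePositions)
--     if k * 2 + 1 >= prizePositions[-1] - prizePositions[0]:
--         return n
--     # forward pass: f[i] = best single length-k segment among prizes[0..i]
--     f = [0] * n
--     best = 0
--     for i in range(n):
--         lo = bisect_left(prizePositions, prizePositions[i] - k)
--         best = max(best, i - lo + 1)
--         f[i] = best
--     # backward pass: g[j] = best single length-k segment starting at index >= j
--     g = [0] * (n + 1)
--     best = 0
--     for j in range(n - 1, -1, -1):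
--         hi = bisect_right(prizePositions, prizePositions[j] + k)
--         best = max(best, hi - j)
--         g[j] = best
--     return max(f[i] + g[i + 1] for i in range(n))
-- ===== Notes on version B (the rewrite author's own statement) =====
-- stated objective: alternative
-- what changed: A's single amortized two-pointer pass with an inline prefix-max array is replaced by two independent bisect-based passes (best segment inside each prefix, best segment starting in each suffix) combined over all split points.
-- outside the precondition, e.g. on maximizeWin([6, -8, -4, -14, -4, 12], 1): A returns 6, B returns 5
import Mathlib
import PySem

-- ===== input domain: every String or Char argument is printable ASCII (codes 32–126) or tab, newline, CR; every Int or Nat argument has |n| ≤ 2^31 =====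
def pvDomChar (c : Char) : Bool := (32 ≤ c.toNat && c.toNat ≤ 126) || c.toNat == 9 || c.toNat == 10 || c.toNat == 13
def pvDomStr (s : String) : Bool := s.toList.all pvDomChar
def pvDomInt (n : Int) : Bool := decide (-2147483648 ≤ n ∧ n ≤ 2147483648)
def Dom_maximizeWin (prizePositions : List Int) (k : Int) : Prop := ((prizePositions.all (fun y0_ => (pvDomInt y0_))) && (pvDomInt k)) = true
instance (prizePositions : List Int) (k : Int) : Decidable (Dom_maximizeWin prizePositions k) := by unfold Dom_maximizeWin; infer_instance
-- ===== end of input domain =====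

-- B replaces A's single coupled pass (two-pointer window + inline prefix-max array) by two
-- independent bisect-based passes (best segment within a prefix / best segment starting in a
-- suffix) combined over all split points; objective: alternative (same result, different algorithm).

-- ===== PORT A =====
-- inner 'while p - prizePositions[left] > k: left += 1'; the fuel only bounds the walk
-- (under Pre_ it is never exhausted; list indexing via pyGetD, exact while the index is in range)
def pvAdvA (xs : List Int) (k p : Int) : Nat → Nat → Nat
  | 0, left => left
  | fuel+1, left =>
      if p - PySem.List.pyGetD xs (left : Int) 0 > k then pvAdvA xs k p fuel (left+1) else left

-- one iteration of A's 'for right, p in enumerate(prizePositions)' body; state = (ans, left, pre);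
-- 'pre[right + 1] = …' is ported as pySetD, exact while the index is in range (Pre_ guarantees it)
def pvStepA (xs : List Int) (k : Int) (st : Int × Nat × List Int) (rp : Int × Int) : Int × Nat × List Int :=
  let left := pvAdvA xs k rp.2 xs.length st.2.1
  let w : Int := rp.1 - (left : Int) + 1
  (max st.1 (w + PySem.List.pyGetD st.2.2 (left : Int) 0),
   left,
   PySem.List.pySetD st.2.2 (rp.1 + 1) (max (PySem.List.pyGetD st.2.2 rp.1 0) w))

def maximizeWin (prizePositions : List Int) (k : Int) : Int :=
  let n := prizePositions.length
  if k * 2 + 1 ≥ PySem.List.pyGetD prizePositions (-1) 0 - PySem.List.pyGetD prizePositions 0 0 then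
    (n : Int)
  else
    ((PySem.List.enumerate prizePositions 0).foldl (pvStepA prizePositions k)
      (0, 0, List.replicate (n+1) 0)).1

-- ===== PORT B =====
-- forward pass body: f[i] = best single segment among prizes[0..i]; state = (f, best)
def pvStepF (xs : List Int) (k : Int) (st : List Int × Int) (i : Int) : List Int × Int :=
  let lo := PySem.List.bisectLeft xs (PySem.List.pyGetD xs i 0 - k)
  let best := max st.2 (i - (lo : Int) + 1)
  (PySem.List.pySetD st.1 i best, best)

-- backward pass body: g[j] = best single segment starting at index ≥ j; state = (g, best)
def pvStepG (xs : List Int) (k : Int) (st : List Int × Int) (j : Int) : List Int × Int :=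
  let hi := PySem.List.bisectRight xs (PySem.List.pyGetD xs j 0 + k)
  let best := max st.2 ((hi : Int) - j)
  (PySem.List.pySetD st.1 j best, best)

def maximizeWin_alt (prizePositions : List Int) (k : Int) : Int :=
  let n := prizePositions.length
  if k * 2 + 1 ≥ PySem.List.pyGetD prizePositions (-1) 0 - PySem.List.pyGetD prizePositions 0 0 then
    (n : Int)
  else
    let f := ((PySem.List.pyRange 0 (n : Int) 1).foldl (pvStepF prizePositions k)
                (List.replicate n 0, 0)).1
    let g := ((PySem.List.pyRange ((n : Int) - 1) (-1) (-1)).foldl (pvStepG prizePositions k)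
                (List.replicate (n+1) 0, 0)).1
    (PySem.List.max? ((PySem.List.pyRange 0 (n : Int) 1).map
        (fun i => PySem.List.pyGetD f i 0 + PySem.List.pyGetD g (i+1) 0)) (fun y => y)).getD 0

-- ===== PRECONDITION & SPEC =====
-- Pre_ excludes: the empty list (A raises IndexError on prizePositions[-1]); and inputs that are
-- not sorted ascending with k ≥ 0 yet escape the early-exit guard — the function's contract
-- (LeetCode 2555) guarantees a sorted array and k ≥ 1, and on unsorted inputs past the guard A's
-- two-pointer walk either raises IndexError or yields an accidental value no specification covers.
def Pre_maximizeWin (prizePositions : List Int) (k : Int) : Prop :=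
  prizePositions ≠ [] ∧
    (k * 2 + 1 ≥ prizePositions.getD (prizePositions.length - 1) 0 - prizePositions.getD 0 0 ∨
      (List.Pairwise (· ≤ ·) prizePositions ∧ 0 ≤ k))
instance (prizePositions : List Int) (k : Int) : Decidable (Pre_maximizeWin prizePositions k) := by
  unfold Pre_maximizeWin; infer_instance

def pvWitness_maximizeWin : List Int × Int := ([0, 5], 1)

def Spec_maximizeWin (prizePositions : List Int) (k : Int) (out : Int) : Prop := out = maximizeWin_alt prizePositions k
instance (prizePositions : List Int) (k : Int) (out : Int) : Decidable (Spec_maximizeWin prizePositions k out) := by unfold Spec_maximizeWin; infer_instance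

-- ===== CLAIM (what is proved, stated in full; the proofs are below) =====
def Claim_equal_maximizeWin : Prop := ∀ (prizePositions : List Int) (k : Int), Dom_maximizeWin prizePositions k → Pre_maximizeWin prizePositions k → Spec_maximizeWin prizePositions k (maximizeWin prizePositions k)

-- ===== LEMMAS AND PROOFS =====

def pvA (xs : List Int) (i : Nat) : Int := xs.getD i 0

def pvL (xs : List Int) (k : Int) (r : Nat) : Nat := PySem.List.bisectLeft xs (pvA xs r - k)

def pvR (xs : List Int) (k : Int) (j : Nat) : Nat := PySem.List.bisectRight xs (pvA xs j + k)

theorem pvA_mono {xs : List Int} (hs : List.Pairwise (· ≤ ·) xs) {i j : Nat}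
    (hij : i ≤ j) (hj : j < xs.length) : pvA xs i ≤ pvA xs j := by
  rcases Nat.lt_or_ge i j with h | h
  · have := (List.pairwise_iff_getElem.mp hs) i j (by omega) hj h
    simpa [pvA, List.getD_eq_getElem?_getD, List.getElem?_eq_getElem, hj, show i < xs.length by omega] using this
  · have : i = j := by omega
    subst this; rfl

theorem pvL_le_len (xs : List Int) (k : Int) (hs : List.Pairwise (· ≤ ·) xs) (r : Nat) :
    pvL xs k r ≤ xs.length := (PySem.List.bisectLeft_spec xs _ hs).1

theorem pvL_lt (xs : List Int) (k : Int) (hs : List.Pairwise (· ≤ ·) xs) (r : Nat)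
    {i : Nat} (hi : i < xs.length) (h : i < pvL xs k r) : pvA xs i < pvA xs r - k := by
  have := (PySem.List.bisectLeft_spec xs (pvA xs r - k) hs).2.1 i hi h
  simpa [pvA, List.getD_eq_getElem?_getD, List.getElem?_eq_getElem, hi] using this

theorem pvL_ge (xs : List Int) (k : Int) (hs : List.Pairwise (· ≤ ·) xs) (r : Nat)
    {i : Nat} (hi : i < xs.length) (h : pvL xs k r ≤ i) : pvA xs r - k ≤ pvA xs i := by
  have := (PySem.List.bisectLeft_spec xs (pvA xs r - k) hs).2.2 i hi h
  simpa [pvA, List.getD_eq_getElem?_getD, List.getElem?_eq_getElem, hi] using this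

theorem pvR_le_len (xs : List Int) (k : Int) (hs : List.Pairwise (· ≤ ·) xs) (j : Nat) :
    pvR xs k j ≤ xs.length := (PySem.List.bisectRight_spec xs _ hs).1

theorem pvR_lt (xs : List Int) (k : Int) (hs : List.Pairwise (· ≤ ·) xs) (j : Nat)
    {i : Nat} (hi : i < xs.length) (h : i < pvR xs k j) : pvA xs i ≤ pvA xs j + k := by
  have := (PySem.List.bisectRight_spec xs (pvA xs j + k) hs).2.1 i hi h
  simpa [pvA, List.getD_eq_getElem?_getD, List.getElem?_eq_getElem, hi] using this

theorem pvR_ge (xs : List Int) (k : Int) (hs : List.Pairwise (· ≤ ·) xs) (j : Nat)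
    {i : Nat} (hi : i < xs.length) (h : pvR xs k j ≤ i) : pvA xs j + k < pvA xs i := by
  have := (PySem.List.bisectRight_spec xs (pvA xs j + k) hs).2.2 i hi h
  simpa [pvA, List.getD_eq_getElem?_getD, List.getElem?_eq_getElem, hi] using this

theorem pvL_le_self (xs : List Int) (k : Int) (hs : List.Pairwise (· ≤ ·) xs) (hk : 0 ≤ k)
    {r : Nat} (hr : r < xs.length) : pvL xs k r ≤ r := by
  by_contra h
  have := pvL_lt xs k hs r hr (by omega)
  omega

theorem lt_pvR (xs : List Int) (k : Int) (hs : List.Pairwise (· ≤ ·) xs) (hk : 0 ≤ k)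
    {j : Nat} (hj : j < xs.length) : j < pvR xs k j := by
  by_contra h
  have := pvR_ge xs k hs j hj (by omega)
  omega

theorem pvL_mono (xs : List Int) (k : Int) (hs : List.Pairwise (· ≤ ·) xs)
    {r r' : Nat} (h : r ≤ r') (hr' : r' < xs.length) : pvL xs k r ≤ pvL xs k r' := by
  by_contra hc
  have h1 : pvL xs k r' < pvL xs k r := by omega
  have hlt : pvL xs k r' < xs.length := by
    have := pvL_le_len xs k hs r
    omega
  have h2 := pvL_lt xs k hs r hlt h1
  have h3 := pvL_ge xs k hs r' hlt (le_refl _)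
  have h4 := pvA_mono hs h hr'
  omega

theorem lt_pvR_pvL (xs : List Int) (k : Int) (hs : List.Pairwise (· ≤ ·) xs) (hk : 0 ≤ k)
    {r : Nat} (hr : r < xs.length) : r < pvR xs k (pvL xs k r) := by
  have hLr : pvL xs k r ≤ r := pvL_le_self xs k hs hk hr
  by_contra h
  have h1 := pvR_ge xs k hs (pvL xs k r) hr (by omega)
  have h2 := pvL_ge xs k hs r (by omega) (le_refl _)
  omega

theorem pvL_pvR_le (xs : List Int) (k : Int) (hs : List.Pairwise (· ≤ ·) xs) (hk : 0 ≤ k)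
    {j : Nat} (hj : j < xs.length) : pvL xs k (pvR xs k j - 1) ≤ j := by
  have hjR : j < pvR xs k j := lt_pvR xs k hs hk hj
  have hRlen : pvR xs k j ≤ xs.length := pvR_le_len xs k hs j
  by_contra hc
  have h1 : j < pvL xs k (pvR xs k j - 1) := by omega
  have h2 := pvL_lt xs k hs (pvR xs k j - 1) hj h1
  have h3 := pvR_lt xs k hs j (i := pvR xs k j - 1) (by omega) (by omega)
  omega

def pvMax (h : Nat → Int) (n : Nat) : Int := (List.range n).foldl (fun m i => max m (h i)) 0

theorem pvMax_succ (h : Nat → Int) (m : Nat) : pvMax h (m+1) = max (pvMax h m) (h m) := by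
  simp [pvMax, List.range_succ]

theorem pvMax_nonneg (h : Nat → Int) (n : Nat) : 0 ≤ pvMax h n := by
  induction n with
  | zero => simp [pvMax]
  | succ m ih => rw [pvMax_succ]; exact le_trans ih (le_max_left _ _)

theorem le_pvMax (h : Nat → Int) {i n : Nat} (hi : i < n) : h i ≤ pvMax h n := by
  induction n with
  | zero => omega
  | succ m ih =>
    rw [pvMax_succ]
    rcases Nat.lt_succ_iff_lt_or_eq.mp hi with h' | h'
    · exact le_trans (ih h') (le_max_left _ _)
    · subst h'; exact le_max_right _ _

theorem pvMax_le (h : Nat → Int) {n : Nat} {m : Int} (hm : 0 ≤ m) (hb : ∀ i, i < n → h i ≤ m) :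
    pvMax h n ≤ m := by
  induction n with
  | zero => simpa [pvMax]
  | succ j ih =>
    rw [pvMax_succ]
    exact max_le (ih (fun i hi => hb i (by omega))) (hb j (by omega))

theorem pvMax_mem (h : Nat → Int) (n : Nat) : pvMax h n = 0 ∨ ∃ i, i < n ∧ pvMax h n = h i := by
  induction n with
  | zero => left; simp [pvMax]
  | succ m ih =>
    rw [pvMax_succ]
    rcases max_cases (pvMax h m) (h m) with ⟨he, _⟩ | ⟨he, _⟩
    · rw [he]
      rcases ih with h0 | ⟨i, hi, hv⟩
      · exact Or.inl h0
      · exact Or.inr ⟨i, by omega, hv⟩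
    · exact Or.inr ⟨m, by omega, he⟩

theorem foldl_max_of_nonneg (h : Nat → Int) (m : Nat) {x : Int} (hx : 0 ≤ x) :
    (List.range m).foldl (fun acc t => max acc (h t)) x = max x (pvMax h m) := by
  induction m with
  | zero => simp [pvMax]; omega
  | succ j ih =>
    rw [List.range_succ, List.foldl_append, ih, pvMax_succ]
    simp [max_assoc]

theorem pvMax_cons (h : Nat → Int) (m : Nat) :
    pvMax h (m+1) = max (max 0 (h 0)) (pvMax (fun t => h (t+1)) m) := by
  rw [pvMax, List.range_succ_eq_map]
  simp only [List.foldl_cons, List.foldl_map]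
  exact foldl_max_of_nonneg (fun t => h (t+1)) m (le_max_left _ _)

def pvW (xs : List Int) (k : Int) (r : Nat) : Int := (r : Int) - (pvL xs k r : Int) + 1

def pvV (xs : List Int) (k : Int) (j : Nat) : Int := (pvR xs k j : Int) - (j : Int)

def pvFM (xs : List Int) (k : Int) (m : Nat) : Int := pvMax (pvW xs k) m

def pvGM (xs : List Int) (k : Int) (j : Nat) : Int :=
  pvMax (fun t => pvV xs k (j + t)) (xs.length - j)

theorem pvW_le_pvV (xs : List Int) (k : Int) (hs : List.Pairwise (· ≤ ·) xs) (hk : 0 ≤ k)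
    {r : Nat} (hr : r < xs.length) : pvW xs k r ≤ pvV xs k (pvL xs k r) := by
  have := lt_pvR_pvL xs k hs hk hr
  unfold pvW pvV; omega

theorem pvFM_lip (xs : List Int) (k : Int) (hs : List.Pairwise (· ≤ ·) xs) (hk : 0 ≤ k)
    {i j : Nat} (hij : i ≤ j) (hj : j ≤ xs.length) :
    pvFM xs k j ≤ pvFM xs k i + ((j : Int) - (i : Int)) := by
  induction j with
  | zero =>
    have : i = 0 := by omega
    subst this; simp
  | succ m ih =>
    rcases Nat.lt_or_ge i (m+1) with h | h
    · have hstep : pvFM xs k (m+1) ≤ pvFM xs k m + 1 := by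
        unfold pvFM
        rw [pvMax_succ]
        rcases Nat.eq_zero_or_pos m with h0 | h0
        · subst h0
          have hL := pvL_le_self xs k hs hk (r := 0) (by omega)
          simp only [pvMax, List.range_zero, List.foldl_nil]
          have : pvW xs k 0 = 1 := by unfold pvW; omega
          omega
        · have hmono := pvL_mono xs k hs (r := m - 1) (r' := m) (by omega) (by omega)
          have hw : pvW xs k m ≤ pvW xs k (m-1) + 1 := by unfold pvW; omega
          have hfm : pvW xs k (m-1) ≤ pvMax (pvW xs k) m := le_pvMax _ (by omega)
          have := le_max_left (pvMax (pvW xs k) m) (pvW xs k m)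
          omega
      have := ih (by omega) (by omega)
      push_cast
      omega
    · have : i = m + 1 := by omega
      subst this; simp

theorem pvGM_rec (xs : List Int) (k : Int) (hs : List.Pairwise (· ≤ ·) xs) (hk : 0 ≤ k)
    {j : Nat} (hj : j < xs.length) : pvGM xs k j = max (pvGM xs k (j+1)) (pvV xs k j) := by
  have hv : 1 ≤ pvV xs k j := by
    have := lt_pvR xs k hs hk hj
    unfold pvV; omega
  have hlen : xs.length - j = (xs.length - (j+1)) + 1 := by omega
  unfold pvGM
  rw [hlen, pvMax_cons]
  have h0 : max 0 (pvV xs k (j + 0)) = pvV xs k j := by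
    simp only [Nat.add_zero]; omega
  rw [h0]
  have : (fun t => pvV xs k (j + (t + 1))) = (fun t => pvV xs k ((j+1) + t)) := by
    funext t; congr 1; omega
  rw [this, max_comm]

theorem pvGM_nonneg (xs : List Int) (k : Int) (j : Nat) : 0 ≤ pvGM xs k j :=
  pvMax_nonneg _ _

theorem pvFM_mono (xs : List Int) (k : Int) {i j : Nat} (h : i ≤ j) :
    pvFM xs k i ≤ pvFM xs k j := by
  unfold pvFM
  induction j with
  | zero =>
    have h0 : i = 0 := by omega
    subst h0
    exact le_refl _
  | succ m ih =>
    rcases Nat.lt_or_ge i (m+1) with h' | h'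
    · exact le_trans (ih (by omega)) (by rw [pvMax_succ]; exact le_max_left _ _)
    · have : i = m + 1 := by omega
      subst this; rfl

theorem pvV_le_pvGM (xs : List Int) (k : Int) {j : Nat} (hj : j < xs.length) :
    pvV xs k j ≤ pvGM xs k j := by
  unfold pvGM
  have : pvV xs k j = (fun t => pvV xs k (j + t)) 0 := by simp
  rw [this]
  exact le_pvMax _ (by omega)

theorem pvGM_mem (xs : List Int) (k : Int) (j : Nat) :
    pvGM xs k j = 0 ∨ ∃ j', j ≤ j' ∧ j' < xs.length ∧ pvGM xs k j = pvV xs k j' := by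
  rcases pvMax_mem (fun t => pvV xs k (j + t)) (xs.length - j) with h | ⟨t, ht, hv⟩
  · exact Or.inl h
  · exact Or.inr ⟨j + t, by omega, by omega, hv⟩

-- the core combinatorial identity

theorem pvMain (xs : List Int) (k : Int) (hs : List.Pairwise (· ≤ ·) xs) (hk : 0 ≤ k)
    (hn : 0 < xs.length) :
    pvMax (fun r => pvW xs k r + pvFM xs k (pvL xs k r)) xs.length =
      pvMax (fun i => pvFM xs k (i+1) + pvGM xs k (i+1)) xs.length := by
  set n := xs.length with hn'
  set A := pvMax (fun r => pvW xs k r + pvFM xs k (pvL xs k r)) n with hA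
  set B := pvMax (fun i => pvFM xs k (i+1) + pvGM xs k (i+1)) n with hB
  set M := pvMax (fun j => pvFM xs k j + pvV xs k j) n with hM
  have hA0 : 0 ≤ A := pvMax_nonneg _ _
  have hB0 : 0 ≤ B := pvMax_nonneg _ _
  have hM0 : 0 ≤ M := pvMax_nonneg _ _
  -- each w r ≤ some M-term; used twice
  have hwM : ∀ r, r < n → pvW xs k r ≤ M := by
    intro r hr
    have h1 : pvW xs k r ≤ pvV xs k (pvL xs k r) := pvW_le_pvV xs k hs hk hr
    have h2 : 0 ≤ pvFM xs k (pvL xs k r) := pvMax_nonneg _ _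
    have h3 : pvFM xs k (pvL xs k r) + pvV xs k (pvL xs k r) ≤ M := by
      apply le_pvMax (n := n)
      have := pvL_le_self xs k hs hk hr
      omega
    omega
  have hAM : A ≤ M := by
    rw [hA]
    apply pvMax_le _ hM0
    intro r hr
    have h1 : pvW xs k r ≤ pvV xs k (pvL xs k r) := pvW_le_pvV xs k hs hk hr
    have h3 : pvFM xs k (pvL xs k r) + pvV xs k (pvL xs k r) ≤ M := by
      apply le_pvMax (n := n)
      have := pvL_le_self xs k hs hk hr
      omega
    omega
  have hMA : M ≤ A := by
    rw [hM]
    apply pvMax_le _ hA0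
    intro j hj
    -- take r = pvR j - 1
    set r := pvR xs k j - 1 with hr'
    have hjR : j < pvR xs k j := lt_pvR xs k hs hk hj
    have hRlen : pvR xs k j ≤ n := pvR_le_len xs k hs j
    have hrn : r < n := by omega
    have hLr : pvL xs k r ≤ j := pvL_pvR_le xs k hs hk hj
    have hterm : pvW xs k r + pvFM xs k (pvL xs k r) ≤ A := le_pvMax _ hrn
    have hlip : pvFM xs k j ≤ pvFM xs k (pvL xs k r) + ((j : Int) - (pvL xs k r : Int)) :=
      pvFM_lip xs k hs hk hLr (by omega)
    have hw : pvW xs k r = pvV xs k j + ((j : Int) - (pvL xs k r : Int)) := by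
      unfold pvW pvV; omega
    omega
  have hBM : B ≤ M := by
    rw [hB]
    apply pvMax_le _ hM0
    intro i hi
    rcases pvGM_mem xs k (i+1) with h0 | ⟨j, hij, hjn, hv⟩
    · -- GM (i+1) = 0 : term = FM (i+1); bound FM n ≤ M suffices via monotonicity
      rw [h0, add_zero]
      have hfm : pvFM xs k (i+1) ≤ M := by
        unfold pvFM
        apply pvMax_le _ hM0
        intro r hr
        exact hwM r (by omega)
      exact hfm
    · rw [hv]
      have h1 : pvFM xs k (i+1) ≤ pvFM xs k j := pvFM_mono xs k hij
      have h2 : pvFM xs k j + pvV xs k j ≤ M := le_pvMax _ hjn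
      omega
  have hMB : M ≤ B := by
    rw [hM]
    apply pvMax_le _ hB0
    intro j hj
    rcases Nat.eq_zero_or_pos j with h0 | h0
    · subst h0
      -- FM 0 + v 0 = v 0 ≤ w (R 0 - 1) ≤ FM n = B-term at n-1
      have hfm0 : pvFM xs k 0 = 0 := by simp [pvFM, pvMax]
      have hjR : (0:Nat) < pvR xs k 0 := lt_pvR xs k hs hk hj
      have hRlen : pvR xs k 0 ≤ n := pvR_le_len xs k hs 0
      have hLr : pvL xs k (pvR xs k 0 - 1) ≤ 0 := pvL_pvR_le xs k hs hk hj
      have hv : pvV xs k 0 ≤ pvW xs k (pvR xs k 0 - 1) := by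
        unfold pvV pvW; omega
      have hw : pvW xs k (pvR xs k 0 - 1) ≤ pvFM xs k n := le_pvMax _ (by omega)
      have hgm : 0 ≤ pvGM xs k n := pvGM_nonneg _ _ _
      have hterm : pvFM xs k ((n-1)+1) + pvGM xs k ((n-1)+1) ≤ B := le_pvMax _ (by omega)
      have heq : (n-1)+1 = n := by omega
      rw [heq] at hterm
      omega
    · have hvg : pvV xs k j ≤ pvGM xs k j := pvV_le_pvGM xs k hj
      have hterm : pvFM xs k ((j-1)+1) + pvGM xs k ((j-1)+1) ≤ B := le_pvMax _ (by omega)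
      have heq : (j-1)+1 = j := by omega
      rw [heq] at hterm
      omega
  omega

def pvPrevL (xs : List Int) (k : Int) : Nat → Nat
  | 0 => 0
  | m'+1 => pvL xs k m'

theorem pvAdvA_eq (xs : List Int) (k : Int) (hs : List.Pairwise (· ≤ ·) xs) (hk : 0 ≤ k)
    {r : Nat} (hr : r < xs.length) :
    ∀ (fuel left₀ : Nat), left₀ ≤ pvL xs k r → pvL xs k r - left₀ ≤ fuel →
      pvAdvA xs k (pvA xs r) fuel left₀ = pvL xs k r := by
  intro fuel
  induction fuel with
  | zero =>
    intro left₀ h1 h2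
    have : left₀ = pvL xs k r := by omega
    simpa [pvAdvA] using this
  | succ f ih =>
    intro left₀ h1 h2
    rcases Nat.lt_or_ge left₀ (pvL xs k r) with hlt | hge
    · have hln : left₀ < xs.length := by
        have h3 := pvL_le_self xs k hs hk hr
        omega
      have hcond := pvL_lt xs k hs r hln hlt
      rw [pvAdvA, PySem.List.pyGetD_natCast]
      rw [if_pos (by unfold pvA at hcond ⊢; omega)]
      exact ih (left₀+1) (by omega) (by omega)
    · have heq : left₀ = pvL xs k r := by omega
      subst heq
      have hLn : pvL xs k r < xs.length := by
        have := pvL_le_self xs k hs hk hr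
        omega
      have hcond := pvL_ge xs k hs r hLn (le_refl _)
      rw [pvAdvA, PySem.List.pyGetD_natCast]
      rw [if_neg (by unfold pvA at hcond ⊢; omega)]

theorem pvFoldA (xs : List Int) (k : Int) (hs : List.Pairwise (· ≤ ·) xs) (hk : 0 ≤ k)
    {m : Nat} (hm : m ≤ xs.length) :
    ((List.range m).map (fun (t : Nat) => ((t : Int), pvA xs t))).foldl (pvStepA xs k)
        (0, 0, List.replicate (xs.length + 1) 0) =
      (pvMax (fun r => pvW xs k r + pvFM xs k (pvL xs k r)) m,
       pvPrevL xs k m,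
       (List.range (xs.length + 1)).map (fun i => if i ≤ m then pvFM xs k i else 0)) := by
  induction m with
  | zero =>
    simp only [List.range_zero, List.map_nil, List.foldl_nil]
    refine Prod.ext rfl (Prod.ext rfl ?_)
    apply List.ext_getElem
    · simp
    · intro i h1 h2
      simp only [List.getElem_replicate, List.getElem_map, List.getElem_range]
      split
      · next h => simp [show i = 0 by omega, pvFM, pvMax]
      · rfl
  | succ m ih =>
    have hmn : m < xs.length := by omega
    rw [List.range_succ, List.map_append, List.foldl_append, ih (by omega)]
    simp only [List.map_cons, List.map_nil, List.foldl_cons, List.foldl_nil]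
    -- reduce one application of pvStepA
    have hLm : pvL xs k m ≤ m := pvL_le_self xs k hs hk hmn
    have hLprev : pvPrevL xs k m ≤ pvL xs k m := by
      cases m with
      | zero => exact Nat.zero_le _
      | succ m' => exact pvL_mono xs k hs (by omega) hmn
    have hadv : pvAdvA xs k (pvA xs m) xs.length (pvPrevL xs k m) = pvL xs k m := by
      apply pvAdvA_eq xs k hs hk hmn
      · exact hLprev
      · have := pvL_le_len xs k hs m
        omega
    simp only [pvStepA, hadv]
    refine Prod.ext ?_ (Prod.ext (by simp [pvPrevL]) ?_)
    · -- ans component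
      show max (pvMax (fun r => pvW xs k r + pvFM xs k (pvL xs k r)) m)
          (((m : Int) - (pvL xs k m : Int) + 1) +
            PySem.List.pyGetD ((List.range (xs.length + 1)).map (fun i => if i ≤ m then pvFM xs k i else 0)) ((pvL xs k m : Nat) : Int) 0) =
        pvMax (fun r => pvW xs k r + pvFM xs k (pvL xs k r)) (m+1)
      rw [PySem.List.pyGetD_natCast, PySem.List.getD_map_range _ _ _ _ (by omega)]
      rw [if_pos hLm, pvMax_succ]
      rfl
    · -- pre component
      show PySem.List.pySetD ((List.range (xs.length + 1)).map (fun i => if i ≤ m then pvFM xs k i else 0)) ((m : Int) + 1)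
            (max (PySem.List.pyGetD ((List.range (xs.length + 1)).map (fun i => if i ≤ m then pvFM xs k i else 0)) ((m : Nat) : Int) 0)
              ((m : Int) - (pvL xs k m : Int) + 1)) =
          (List.range (xs.length + 1)).map (fun i => if i ≤ m + 1 then pvFM xs k i else 0)
      rw [PySem.List.pyGetD_natCast, PySem.List.getD_map_range _ _ _ _ (by omega), if_pos (le_refl m)]
      have hc : ((m : Int) + 1) = (((m+1 : Nat)) : Int) := by omega
      rw [hc, PySem.List.pySetD_natCast]
      have hval : max (pvFM xs k m) ((m : Int) - (pvL xs k m : Int) + 1) = pvFM xs k (m+1) := by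
        unfold pvFM; rw [pvMax_succ]; rfl
      rw [hval]
      apply List.ext_getElem
      · simp
      · intro i h1 h2
        rw [List.getElem_set]
        simp only [List.getElem_map, List.getElem_range]
        by_cases h : m + 1 = i
        · subst h; simp
        · rw [if_neg h]
          by_cases h' : i ≤ m
          · rw [if_pos h', if_pos (by omega)]
          · rw [if_neg h', if_neg (by omega)]

theorem pvFoldF (xs : List Int) (k : Int) {m : Nat} (hm : m ≤ xs.length) :
    ((List.range m).map (fun (t : Nat) => (t : Int))).foldl (pvStepF xs k) (List.replicate xs.length 0, 0) =
      ((List.range xs.length).map (fun i => if i < m then pvFM xs k (i+1) else 0), pvFM xs k m) := by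
  induction m with
  | zero =>
    simp only [List.range_zero, List.map_nil, List.foldl_nil]
    refine Prod.ext ?_ rfl
    apply List.ext_getElem
    · simp
    · intro i h1 h2
      simp only [List.getElem_replicate, List.getElem_map, List.getElem_range]
      simp
  | succ m ih =>
    have hmn : m < xs.length := by omega
    rw [List.range_succ, List.map_append, List.foldl_append, ih (by omega)]
    simp only [List.map_cons, List.map_nil, List.foldl_cons, List.foldl_nil]
    simp only [pvStepF, PySem.List.pyGetD_natCast]
    have hbest : max (pvFM xs k m) ((m : Int) - (PySem.List.bisectLeft xs (xs.getD m 0 - k) : Int) + 1) = pvFM xs k (m+1) := by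
      unfold pvFM; rw [pvMax_succ]; rfl
    rw [hbest]
    refine Prod.ext ?_ rfl
    show PySem.List.pySetD ((List.range xs.length).map (fun i => if i < m then pvFM xs k (i+1) else 0)) ((m : Nat) : Int) (pvFM xs k (m+1)) = _
    rw [PySem.List.pySetD_natCast]
    apply List.ext_getElem
    · simp
    · intro i h1 h2
      rw [List.getElem_set]
      simp only [List.getElem_map, List.getElem_range]
      by_cases h : m = i
      · subst h; simp
      · rw [if_neg h]
        by_cases h' : i < m
        · rw [if_pos h', if_pos (by omega)]
        · rw [if_neg h', if_neg (by omega)]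

theorem pvFoldG (xs : List Int) (k : Int) (hs : List.Pairwise (· ≤ ·) xs) (hk : 0 ≤ k)
    {m : Nat} (hm : m ≤ xs.length) :
    ((List.range m).map (fun (t : Nat) => ((xs.length : Int) - 1 - (t : Int)))).foldl (pvStepG xs k)
        (List.replicate (xs.length + 1) 0, 0) =
      ((List.range (xs.length + 1)).map (fun i => if xs.length - m ≤ i then pvGM xs k i else 0),
       pvGM xs k (xs.length - m)) := by
  induction m with
  | zero =>
    simp only [List.range_zero, List.map_nil, List.foldl_nil]
    have hGn : pvGM xs k xs.length = 0 := by simp [pvGM, pvMax]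
    refine Prod.ext ?_ (by simpa using hGn.symm)
    apply List.ext_getElem
    · simp
    · intro i h1 h2
      simp only [List.getElem_replicate, List.getElem_map, List.getElem_range]
      split
      · next h =>
        have : i = xs.length := by simp at h1; omega
        subst this
        exact hGn.symm
      · rfl
  | succ m ih =>
    have hmn : m < xs.length := by omega
    rw [List.range_succ, List.map_append, List.foldl_append, ih (by omega)]
    simp only [List.map_cons, List.map_nil, List.foldl_cons, List.foldl_nil]
    set jn := xs.length - 1 - m with hjn
    have hj : ((xs.length : Int) - 1 - (m : Int)) = ((jn : Nat) : Int) := by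
      simp only [hjn]; omega
    simp only [pvStepG, hj, PySem.List.pyGetD_natCast, PySem.List.pySetD_natCast]
    have hjlt : jn < xs.length := by omega
    have hrec : pvGM xs k jn = max (pvGM xs k (jn+1)) (pvV xs k jn) := pvGM_rec xs k hs hk hjlt
    have hbest : max (pvGM xs k (xs.length - m)) ((PySem.List.bisectRight xs (xs.getD jn 0 + k) : Int) - ((jn : Nat) : Int)) = pvGM xs k (xs.length - (m+1)) := by
      have h1 : xs.length - m = jn + 1 := by omega
      have h2 : xs.length - (m+1) = jn := by omega
      rw [h1, h2, hrec]
      rfl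
    rw [hbest]
    refine Prod.ext ?_ rfl
    apply List.ext_getElem
    · simp
    · intro i h1 h2
      rw [List.getElem_set]
      simp only [List.getElem_map, List.getElem_range]
      by_cases h : jn = i
      · subst h
        rw [if_pos rfl, if_pos (show xs.length - (m+1) ≤ jn by omega)]
        congr 1
        omega
      · rw [if_neg h]
        by_cases h' : xs.length - m ≤ i
        · rw [if_pos h', if_pos (by omega)]
        · rw [if_neg h', if_neg (by omega)]

theorem pvGetD_neg_one (xs : List Int) :
    PySem.List.pyGetD xs (-1) 0 = xs.getD (xs.length - 1) 0 := by
  simp [PySem.List.pyGetD, PySem.List.pyGet?_neg_one, List.getLast?_eq_getElem?,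
    List.getD_eq_getElem?_getD]

theorem pvGetD_zero (xs : List Int) : PySem.List.pyGetD xs 0 0 = xs.getD 0 0 := by
  simpa using PySem.List.pyGetD_natCast xs 0 0

theorem pvFinal (xs : List Int) (k : Int) :
    Pre_maximizeWin xs k → maximizeWin xs k = maximizeWin_alt xs k := by
  rintro ⟨hne, hrest⟩
  have hn : 0 < xs.length := List.length_pos_iff.mpr hne
  unfold maximizeWin maximizeWin_alt
  by_cases hg : k * 2 + 1 ≥ PySem.List.pyGetD xs (-1) 0 - PySem.List.pyGetD xs 0 0
  · simp only [if_pos hg]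
  · simp only [if_neg hg]
    -- Pre_'s first disjunct is exactly the guard
    rw [pvGetD_neg_one, pvGetD_zero] at hg
    rcases hrest with hg' | ⟨hs, hk⟩
    · exact absurd hg' hg
    -- A-side
    have henum : PySem.List.enumerate xs 0 =
        (List.range xs.length).map (fun (t : Nat) => ((t : Int), pvA xs t)) := by
      rw [PySem.List.enumerate_eq_map_pyRange xs 0, PySem.List.len_eq, PySem.List.pyRange_one,
        List.map_map]
      simp only [Int.sub_zero, Int.toNat_natCast]
      apply List.map_congr_left
      intro t _
      simp only [Function.comp_apply, Int.zero_add]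
      rw [PySem.List.pyGetD_natCast]
      rfl
    rw [henum, pvFoldA xs k hs hk (le_refl xs.length)]
    -- B-side
    have hrange : PySem.List.pyRange 0 (xs.length : Int) 1 =
        (List.range xs.length).map (fun (t : Nat) => (t : Int)) := by
      rw [PySem.List.pyRange_one]
      simp
    have hrangeg : PySem.List.pyRange ((xs.length : Int) - 1) (-1) (-1) =
        (List.range xs.length).map (fun (t : Nat) => ((xs.length : Int) - 1 - (t : Int))) := by
      rw [PySem.List.pyRange_neg_one]
      have hT : ((xs.length : Int) - 1 - (-1)).toNat = xs.length := by omega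
      rw [hT]
    rw [hrange, hrangeg, pvFoldF xs k (le_refl xs.length), pvFoldG xs k hs hk (le_refl xs.length)]
    simp only [List.map_map]
    have hmapped : (List.range xs.length).map
          ((fun i => PySem.List.pyGetD ((List.range xs.length).map (fun i => if i < xs.length then pvFM xs k (i+1) else 0), pvFM xs k xs.length).1 i 0 +
            PySem.List.pyGetD ((List.range (xs.length + 1)).map (fun i => if xs.length - xs.length ≤ i then pvGM xs k i else 0), pvGM xs k (xs.length - xs.length)).1 (i+1) 0) ∘ (fun (t : Nat) => (t : Int))) =
        (List.range xs.length).map (fun t => pvFM xs k (t+1) + pvGM xs k (t+1)) := by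
      apply List.map_congr_left
      intro t ht
      have htn : t < xs.length := List.mem_range.mp ht
      simp only [Function.comp_apply]
      rw [PySem.List.pyGetD_natCast, PySem.List.getD_map_range _ _ _ _ htn, if_pos htn]
      have hc : ((t : Int) + 1) = (((t + 1 : Nat)) : Int) := by omega
      rw [hc, PySem.List.pyGetD_natCast, PySem.List.getD_map_range _ _ _ _ (by omega),
        if_pos (by omega)]
    rw [hmapped]
    -- evaluate Python max over the nonempty mapped list
    obtain ⟨nn, hnn⟩ : ∃ nn, xs.length = nn + 1 := ⟨xs.length - 1, by omega⟩
    set h : Nat → Int := fun t => pvFM xs k (t+1) + pvGM xs k (t+1) with hh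
    have hh0 : 0 ≤ h 0 := by
      simp only [hh]
      exact add_nonneg (pvMax_nonneg _ _) (pvGM_nonneg _ _ _)
    have hmax : ((PySem.List.max? ((List.range xs.length).map h) (fun y => y)).getD 0) =
        pvMax h xs.length := by
      rw [hnn, List.range_succ_eq_map, List.map_cons, List.map_map,
        PySem.List.max?_id_cons, Option.getD_some, List.foldl_map, foldl_max_of_nonneg _ _ hh0,
        pvMax_cons]
      have : max 0 (h 0) = h 0 := by omega
      rw [this]
      rfl
    rw [hmax]
    exact pvMain xs k hs hk hn

-- ===== VERDICT (by name: the statement is the Claim_ definition above) =====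
theorem maximizeWin_spec : Claim_equal_maximizeWin := by
  intro prizePositions k _ hpre
  exact pvFinal prizePositions k hpre
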